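-- pv_equiv track=rewrite | github.com/emocado/boa-ficc-f2 | dashboard.py | get_latest_config
-- ===== SOURCE A (Python) =====
-- def get_latest_config(event_id, event_list):
--     latest_config = None
--     for event in event_list.values():
--         if event[0]['EventType'] == 'ConfigEvent':
--             latest_config = event
--         if event[0]['EventId'] == event_id:
--             break
--
--     return latest_config
-- ===== SOURCE B (Python) =====
-- def get_latest_config(event_id, event_list):
--     events = list(event_list.values())
--     end = len(events)
--     for i, event in enumerate(events):
--         if event[0]['EventId'] == event_id:
--             end = i + 1
--             break
--     for event in reversed(events[:end]):
--         if event[0]['EventType'] == 'ConfigEvent':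
--             return event
--     return None
-- ===== Notes on version B (the rewrite author's own statement) =====
-- stated objective: alternative
-- what changed: Replaces A's forward accumulate-latest-with-break loop by a two-phase search: first locate the cutoff index of the event with the given EventId, then scan the prefix up to the cutoff in reverse and return the first ConfigEvent.
import Mathlib
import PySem

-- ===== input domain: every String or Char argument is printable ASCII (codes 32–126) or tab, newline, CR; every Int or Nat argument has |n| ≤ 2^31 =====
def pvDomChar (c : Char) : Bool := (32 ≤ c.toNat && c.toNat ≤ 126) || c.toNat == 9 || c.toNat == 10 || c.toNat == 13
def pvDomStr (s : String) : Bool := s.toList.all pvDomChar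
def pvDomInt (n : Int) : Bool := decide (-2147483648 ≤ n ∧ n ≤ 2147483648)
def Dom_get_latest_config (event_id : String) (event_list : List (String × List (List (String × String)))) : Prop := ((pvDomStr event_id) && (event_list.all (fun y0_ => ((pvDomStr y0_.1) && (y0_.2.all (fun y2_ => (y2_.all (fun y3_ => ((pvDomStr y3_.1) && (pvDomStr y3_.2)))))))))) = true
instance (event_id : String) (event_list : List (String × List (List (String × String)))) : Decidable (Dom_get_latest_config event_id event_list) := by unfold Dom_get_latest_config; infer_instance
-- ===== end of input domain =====

-- B replaces A's accumulate-latest-with-break loop by locate-cutoff-then-reverse-find-first (objective: alternative, same cost).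

-- shared accessors for event[0]['EventType'] / event[0]['EventId'] (total via defaults; Pre_ guarantees presence)
def pvEvType (e : List (List (String × String))) : String :=
  PySem.Dict.getD (PySem.Dict.ofList (e.headD [])) "EventType" ""

def pvEvId (e : List (List (String × String))) : String :=
  PySem.Dict.getD (PySem.Dict.ofList (e.headD [])) "EventId" ""

-- ===== PORT A =====
-- the for-loop over event_list.values() with the break, carrying latest_config
def pvGoA (event_id : String) : List (List (List (String × String))) →
    Option (List (List (String × String))) → Option (List (List (String × String)))
  | [], latest => latest
  | e :: rest, latest =>
    let latest' := if pvEvType e == "ConfigEvent" then some e else latest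
    if pvEvId e == event_id then latest' else pvGoA event_id rest latest'

def get_latest_config (event_id : String) (event_list : List (String × List (List (String × String)))) : Option (List (List (String × String))) :=
  pvGoA event_id (PySem.Dict.values (PySem.Dict.ofList event_list)) none

-- ===== PORT B =====
def get_latest_config_alt (event_id : String) (event_list : List (String × List (List (String × String)))) : Option (List (List (String × String))) :=
  let events := PySem.Dict.values (PySem.Dict.ofList event_list)
  let cutoff : Nat :=
    match events.findIdx? (fun e => pvEvId e == event_id) with
    | some i => i + 1
    | none => events.length
  ((events.take cutoff).reverse).find? (fun e => pvEvType e == "ConfigEvent")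

-- ===== PRECONDITION & SPEC =====
-- an event value is well-formed when it is nonempty and its first dict has both keys A reads
def pvWf (e : List (List (String × String))) : Bool :=
  !e.isEmpty && (PySem.Dict.ofList (e.headD [])).contains "EventType"
             && (PySem.Dict.ofList (e.headD [])).contains "EventId"

-- Pre_ excludes exactly the inputs on which A raises (KeyError/IndexError): some event value up to
-- and including the first one whose EventId matches is empty or lacks 'EventType'/'EventId'.
def Pre_get_latest_config (event_id : String) (event_list : List (String × List (List (String × String)))) : Prop :=
  ∀ i < (PySem.Dict.values (PySem.Dict.ofList event_list)).length,
    (∀ j < i, pvWf ((PySem.Dict.values (PySem.Dict.ofList event_list)).getD j []) = true ∧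
      (pvEvId ((PySem.Dict.values (PySem.Dict.ofList event_list)).getD j []) == event_id) = false) →
    pvWf ((PySem.Dict.values (PySem.Dict.ofList event_list)).getD i []) = true
instance (event_id : String) (event_list : List (String × List (List (String × String)))) : Decidable (Pre_get_latest_config event_id event_list) := by unfold Pre_get_latest_config; infer_instance

def pvWitness_get_latest_config : String × (List (String × List (List (String × String)))) :=
  ("x", [("a", [[("EventType", "ConfigEvent"), ("EventId", "x")]])])

def Spec_get_latest_config (event_id : String) (event_list : List (String × List (List (String × String)))) (out : Option (List (List (String × String)))) : Prop := out = get_latest_config_alt event_id event_list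
instance (event_id : String) (event_list : List (String × List (List (String × String)))) (out : Option (List (List (String × String)))) : Decidable (Spec_get_latest_config event_id event_list out) := by unfold Spec_get_latest_config; infer_instance

-- ===== CLAIM (what is proved, stated in full; the proofs are below) =====
def Claim_equal_get_latest_config : Prop := ∀ (event_id : String) (event_list : List (String × List (List (String × String)))), Dom_get_latest_config event_id event_list → Pre_get_latest_config event_id event_list → Spec_get_latest_config event_id event_list (get_latest_config event_id event_list)

-- ===== LEMMAS AND PROOFS =====

-- the cutoff B computes, as a function of the values list
def pvCut (event_id : String) (vs : List (List (List (String × String)))) : Nat :=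
  match vs.findIdx? (fun e => pvEvId e == event_id) with
  | some i => i + 1
  | none => vs.length

theorem pvGoA_eq (event_id : String) (vs : List (List (List (String × String))))
    (latest : Option (List (List (String × String)))) :
    pvGoA event_id vs latest =
      (((vs.take (pvCut event_id vs)).reverse).find? (fun e => pvEvType e == "ConfigEvent")).or latest := by
  induction vs generalizing latest with
  | nil => simp [pvGoA, pvCut]
  | cons e rest ih =>
    by_cases hid : (pvEvId e == event_id) = true
    · have hcut : pvCut event_id (e :: rest) = 1 := by
        simp [pvCut, List.findIdx?_cons, hid]
      simp only [pvGoA, hid, if_true, hcut]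
      by_cases hcfg : (pvEvType e == "ConfigEvent") = true <;>
        simp [List.find?, hcfg]
    · have hcut : pvCut event_id (e :: rest) = pvCut event_id rest + 1 := by
        simp only [pvCut, List.findIdx?_cons, hid, if_false, Bool.false_eq_true]
        cases rest.findIdx? (fun e => pvEvId e == event_id) <;> simp [List.length_cons]
      rw [hcut]
      simp only [pvGoA, hid, if_false, Bool.false_eq_true]
      rw [ih]
      have htake : (e :: rest).take (pvCut event_id rest + 1) = e :: rest.take (pvCut event_id rest) := rfl
      rw [htake, List.reverse_cons, List.find?_append]
      by_cases hcfg : (pvEvType e == "ConfigEvent") = true <;>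
        cases hfr : ((rest.take (pvCut event_id rest)).reverse).find? (fun e => pvEvType e == "ConfigEvent") <;>
        simp [List.find?, hcfg, Option.or]

-- ===== VERDICT (by name: the statement is the Claim_ definition above) =====
theorem get_latest_config_spec : Claim_equal_get_latest_config := by
  intro event_id event_list _ _
  unfold Spec_get_latest_config get_latest_config get_latest_config_alt
  rw [pvGoA_eq]
  simp [pvCut]
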